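-- pv_equiv track=rewrite | github.com/pjestin/aoc | 2017/day09/day09.py | count_garbage
-- ===== SOURCE A (Python) =====
-- def count_garbage(line: str) -> int:
--     should_ignore_next = False
--     is_garbage = False
--     garbage_count = 0
--     for char in line:
--         if should_ignore_next:
--             should_ignore_next = False
--             continue
--
--         if char == "!":
--             should_ignore_next = True
--             continue
--
--         if is_garbage and char != ">":
--             garbage_count += 1
--             continue
--
--         if char == "<":
--             is_garbage = True
--         elif char == ">":
--             is_garbage = False
--
--     return garbage_count
-- ===== SOURCE B (Python) =====
-- def count_garbage(line: str) -> int: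
--     # Pass 1: resolve '!' escapes, producing the cleaned stream.
--     cleaned = []
--     skip = False
--     for char in line:
--         if skip:
--             skip = False
--         elif char == "!":
--             skip = True
--         else:
--             cleaned.append(char)
--     # Pass 2: count garbage chars; no escape logic here.
--     count = 0
--     is_garbage = False
--     for char in cleaned:
--         if is_garbage:
--             if char != ">":
--                 count += 1
--             else:
--                 is_garbage = False
--         elif char == "<":
--             is_garbage = True
--     return count
-- ===== Notes on version B (the rewrite author's own statement) =====
-- stated objective: alternative
-- what changed: Replaces A's single fused three-flag state machine with a two-pass decomposition: pass one strips escape characters into an intermediate cleaned list, pass two counts garbage over the cleaned stream with a single boolean and no escape handling.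
import Mathlib
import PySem

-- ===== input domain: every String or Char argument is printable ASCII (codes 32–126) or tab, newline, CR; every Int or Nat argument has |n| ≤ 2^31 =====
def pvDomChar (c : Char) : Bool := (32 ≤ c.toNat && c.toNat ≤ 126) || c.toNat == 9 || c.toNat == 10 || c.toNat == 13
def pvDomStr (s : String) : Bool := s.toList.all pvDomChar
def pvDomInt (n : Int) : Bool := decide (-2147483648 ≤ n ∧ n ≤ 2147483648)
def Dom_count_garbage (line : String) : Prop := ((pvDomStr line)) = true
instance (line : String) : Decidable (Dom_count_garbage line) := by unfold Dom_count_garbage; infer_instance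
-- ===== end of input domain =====

-- B replaces A's fused escape+garbage state machine by a two-pass decomposition
-- (strip escapes into an intermediate list, then count); same O(n) cost.

-- ===== PORT A =====
-- A's loop: state (should_ignore_next, is_garbage, garbage_count), branches in A's order.
def countGarbageLoop : List Char → Bool → Bool → Int → Int
  | [], _, _, c => c
  | ch :: rest, ign, garb, c =>
    if ign then countGarbageLoop rest false garb c
    else if ch = '!' then countGarbageLoop rest true garb c
    else if garb ∧ ch ≠ '>' then countGarbageLoop rest ign garb (c + 1)
    else if ch = '<' then countGarbageLoop rest ign true c
    else if ch = '>' then countGarbageLoop rest ign false c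
    else countGarbageLoop rest ign garb c

def count_garbage (line : String) : Int :=
  countGarbageLoop line.toList false false 0

-- ===== PORT B =====
-- Pass 1 of Source B: strip '!' escapes, building the cleaned list.
def cleanEscapes : List Char → Bool → List Char
  | [], _ => []
  | ch :: rest, skip =>
    if skip then cleanEscapes rest false
    else if ch = '!' then cleanEscapes rest true
    else ch :: cleanEscapes rest false

-- Pass 2 of Source B: count garbage chars over the cleaned stream, no escape logic.
def countCleaned : List Char → Bool → Int → Int
  | [], _, c => c
  | ch :: rest, garb, c =>
    if garb then
      if ch ≠ '>' then countCleaned rest garb (c + 1)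
      else countCleaned rest false c
    else if ch = '<' then countCleaned rest true c
    else countCleaned rest garb c

def count_garbage_alt (line : String) : Int :=
  countCleaned (cleanEscapes line.toList false) false 0

-- ===== PRECONDITION & SPEC =====
def Spec_count_garbage (line : String) (out : Int) : Prop := out = count_garbage_alt line
instance (line : String) (out : Int) : Decidable (Spec_count_garbage line out) := by unfold Spec_count_garbage; infer_instance

-- ===== CLAIM (what is proved, stated in full; the proofs are below) =====
def Claim_equal_count_garbage : Prop := ∀ (line : String), Dom_count_garbage line → Spec_count_garbage line (count_garbage line)

-- ===== LEMMAS AND PROOFS =====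
theorem loop_eq_two_pass (l : List Char) : ∀ (skip garb : Bool) (c : Int),
    countGarbageLoop l skip garb c = countCleaned (cleanEscapes l skip) garb c := by
  induction l with
  | nil => intro skip garb c; rfl
  | cons ch rest ih =>
    intro skip garb c
    by_cases hs : skip = true
    · simp [countGarbageLoop, cleanEscapes, hs, ih]
    · simp only [Bool.not_eq_true] at hs
      subst hs
      by_cases hb : ch = '!'
      · simp [countGarbageLoop, cleanEscapes, hb, ih]
      · by_cases hg : garb = true
        · by_cases hgt : ch = '>'
          · simp [countGarbageLoop, cleanEscapes, countCleaned, hb, hg, hgt, ih]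
          · simp [countGarbageLoop, cleanEscapes, countCleaned, hb, hg, hgt, ih]
        · simp only [Bool.not_eq_true] at hg
          subst hg
          by_cases hlt : ch = '<'
          · simp [countGarbageLoop, cleanEscapes, countCleaned, hb, hlt, ih]
          · by_cases hgt : ch = '>'
            · simp [countGarbageLoop, cleanEscapes, countCleaned, hb, hlt, hgt, ih]
            · simp [countGarbageLoop, cleanEscapes, countCleaned, hb, hlt, hgt, ih]

-- ===== VERDICT (by name: the statement is the Claim_ definition above) =====
theorem count_garbage_spec : Claim_equal_count_garbage := by
  intro line _
  unfold Spec_count_garbage count_garbage count_garbage_alt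
  exact loop_eq_two_pass line.toList false false 0
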